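-- pv_equiv track=rewrite | github.com/pypi-data/pypi-mirror-140 | packages/corgi-org-tool/corgi_org_tool-0.1.0-py3-none-any.whl/corgi/_org.py | partition_headline_path
-- ===== SOURCE A (Python) =====
-- def partition_headline_path(path):
--     """Partition a notation of 'path.org/some headline/sub headline' into 2
--     parts: org path and a list of headlines part"""
--
--     path = path.strip()
--     if path.endswith(".org"):
--         return path, []
--
--     end_index = path.rfind(".org/")
--     if end_index == -1:
--         return path, []
--
--     # 4 == len(".org/")
--     org_path = path[0 : end_index + 4]
--     headlines = [title for title in path[end_index + 5 :].split("/") if title]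
--     return org_path, headlines
-- ===== SOURCE B (Python) =====
-- def _last_org_index(segs):
--     """Index of the LAST segment ending with '.org', or None."""
--     if not segs:
--         return None
--     rest = _last_org_index(segs[1:])
--     if rest is not None:
--         return rest + 1
--     return 0 if segs[0].endswith(".org") else None
--
--
-- def partition_headline_path(path):
--     """Partition a notation of 'path.org/some headline/sub headline' into 2
--     parts: org path and a list of headlines part"""
--
--     path = path.strip()
--     segs = path.split("/")
--     i = _last_org_index(segs)
--     if i is None:
--         return path, []
--     return "/".join(segs[: i + 1]), [t for t in segs[i + 1 :] if t]
-- ===== Notes on version B (the rewrite author's own statement) =====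
-- stated objective: alternative
-- what changed: B replaces A's two-phase endswith('.org') check plus rfind('.org/') substring search and index slicing by a single split of the path into '/'-separated segments, a recursive scan for the last segment ending in '.org', and list take/drop plus join to rebuild the two parts.
import Mathlib
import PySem

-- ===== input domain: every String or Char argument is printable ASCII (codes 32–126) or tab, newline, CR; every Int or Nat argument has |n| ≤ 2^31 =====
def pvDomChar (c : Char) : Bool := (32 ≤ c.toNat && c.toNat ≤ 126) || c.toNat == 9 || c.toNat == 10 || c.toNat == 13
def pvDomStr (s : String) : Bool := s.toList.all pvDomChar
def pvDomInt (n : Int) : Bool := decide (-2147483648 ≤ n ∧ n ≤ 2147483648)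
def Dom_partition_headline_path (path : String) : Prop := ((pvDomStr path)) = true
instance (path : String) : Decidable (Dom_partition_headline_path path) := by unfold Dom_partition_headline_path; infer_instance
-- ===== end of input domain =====

-- B replaces A's endswith/rfind branching by one scan over the '/'-separated segments
-- (last segment ending in '.org' splits the path); objective: alternative decomposition, not speed.

-- ===== PORT A =====
def partition_headline_path (path : String) : String × List String :=
  let p := PySem.Str.strip path
  if PySem.Str.endswith p ".org" then (p, [])
  else
    let endIndex := PySem.Str.rfind p ".org/"
    if endIndex = -1 then (p, [])
    else
      let orgPath := PySem.Str.slice p (some 0) (some (endIndex + 4))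
      let headlines :=
        ((PySem.Str.split? (PySem.Str.slice p (some (endIndex + 5)) none) "/").getD []).filter
          (fun t => t != "")
      (orgPath, headlines)

-- ===== PORT B =====
def lastOrgIndex : List String → Option Nat
  | [] => none
  | x :: t =>
    match lastOrgIndex t with
    | some i => some (i + 1)
    | none => if PySem.Str.endswith x ".org" then some 0 else none

def partition_headline_path_alt (path : String) : String × List String :=
  let p := PySem.Str.strip path
  let segs := (PySem.Str.split? p "/").getD []
  match lastOrgIndex segs with
  | none => (p, [])
  | some i =>
      (PySem.Str.join "/" (segs.take (i + 1)), (segs.drop (i + 1)).filter (fun t => t != ""))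

-- ===== PRECONDITION & SPEC =====
def Spec_partition_headline_path (path : String) (out : String × List String) : Prop := out = partition_headline_path_alt path
instance (path : String) (out : String × List String) : Decidable (Spec_partition_headline_path path out) := by unfold Spec_partition_headline_path; infer_instance

-- ===== CLAIM (what is proved, stated in full; the proofs are below) =====
def Claim_equal_partition_headline_path : Prop := ∀ (path : String), Dom_partition_headline_path path → Spec_partition_headline_path path (partition_headline_path path)

-- ===== LEMMAS AND PROOFS =====

-- abbreviations used only by the proofs
def orgC : List Char := ['.', 'o', 'r', 'g']
def orgSlashC : List Char := ['.', 'o', 'r', 'g', '/']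

-- PySem's splitOn with the one-character separator "/" is Mathlib's List.splitOn '/'
theorem pysplitOn_go_inv (n : Nat) : ∀ (l cur : List Char) (acc : List (List Char)), l.length < n →
    PySem.Chars.splitOn.go ['/'] n l cur acc
      = acc.reverse ++ (l.splitOn '/').modifyHead (cur.reverse ++ ·) := by
  induction n with
  | zero => intro l cur acc h; omega
  | succ n ih =>
    intro l cur acc h
    cases l with
    | nil =>
      show (cur.reverse :: acc).reverse = _
      simp [List.splitOn, List.splitOnP_nil]
    | cons c rest =>
      show (if ['/'].isPrefixOf (c :: rest) = true then
              PySem.Chars.splitOn.go ['/'] n (List.drop 1 (c :: rest)) [] (cur.reverse :: acc)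
            else PySem.Chars.splitOn.go ['/'] n rest (c :: cur) acc) = _
      have hsp : (c :: rest).splitOn '/' = if c == '/' then [] :: rest.splitOn '/'
          else (rest.splitOn '/').modifyHead (List.cons c) := by
        simp [List.splitOn, List.splitOnP_cons]
      by_cases hc : c = '/'
      · subst hc
        rw [if_pos (by simp [List.isPrefixOf])]
        rw [ih _ _ _ (by simpa using Nat.lt_of_succ_lt_succ h)]
        cases hsl : rest.splitOn '/' with
        | nil => exact absurd hsl (by simpa [List.splitOn] using List.splitOnP_ne_nil _ rest)
        | cons a t => simp [hsp, hsl]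
      · rw [if_neg (by simp [List.isPrefixOf]; exact fun h' => hc h'.symm)]
        rw [ih _ _ _ (by simpa using Nat.lt_of_succ_lt_succ h)]
        rw [hsp, if_neg (by simp [hc])]
        rw [List.modifyHead_modifyHead]
        have hf : (fun x : List Char => (c :: cur).reverse ++ x)
            = ((fun x => cur.reverse ++ x) ∘ List.cons c) := by
          funext x; simp
        rw [hf]

theorem pysplitOn_single (s : List Char) :
    PySem.Chars.splitOn s ['/'] = s.splitOn '/' := by
  show PySem.Chars.splitOn.go ['/'] (s.length + 1) s [] [] = _
  rw [pysplitOn_go_inv (s.length + 1) s [] [] (by omega)]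
  cases h : s.splitOn '/' with
  | nil => exact absurd h (by simp [List.splitOn]; exact List.splitOnP_ne_nil _ _)
  | cons a t => simp

theorem splitOn_slash_free (s : List Char) : ∀ l ∈ s.splitOn '/', '/' ∉ l := by
  induction s with
  | nil => simp [List.splitOn, List.splitOnP_nil]
  | cons c rest ih =>
    intro l hl
    rw [List.splitOn, List.splitOnP_cons] at hl
    by_cases hc : c = '/'
    · subst hc
      simp at hl
      rcases hl with h | h
      · simp [h]
      · exact ih l (by rwa [List.splitOn])
    · rw [if_neg (by simp [hc])] at hl
      cases hsl : rest.splitOn '/' with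
      | nil => exact absurd hsl (by simpa [List.splitOn] using List.splitOnP_ne_nil _ rest)
      | cons a t =>
        rw [List.splitOn] at hsl
        rw [hsl] at hl
        simp at hl
        rcases hl with h | h
        · subst h
          have ha : '/' ∉ a := ih a (by rw [List.splitOn, hsl]; exact List.mem_cons_self)
          simp [ha]
          exact fun h' => hc h'.symm
        · exact ih l (by rw [List.splitOn, hsl]; exact List.mem_cons_of_mem _ h)

-- a '/'-free pattern is a suffix of a ++ '/' :: b iff it is a suffix of b
theorem suffix_through_slash (q a b : List Char) (hq : '/' ∉ q) :
    q <:+ (a ++ '/' :: b) ↔ q <:+ b := by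
  constructor
  · intro h
    have hb : ('/' :: b) <:+ (a ++ '/' :: b) := List.suffix_append_of_suffix (List.suffix_refl _)
    rcases List.suffix_or_suffix_of_suffix h hb with h1 | h1
    · rcases List.suffix_cons_iff.mp h1 with h2 | h2
      · exact absurd (h2 ▸ List.mem_cons_self) hq
      · exact h2
    · exact absurd (h1.subset List.mem_cons_self) hq
  · intro h
    exact h.trans ((List.suffix_cons '/' b).trans (List.suffix_append_of_suffix (List.suffix_refl _)))

-- rfind: unfolding equations and full specification (maximal occurrence)
theorem rfind_go_zero (s sub : List Char) :
    PySem.Chars.rfind.go s sub 0 = if sub.isPrefixOf s then 0 else -1 := rfl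

theorem rfind_go_succ (s sub : List Char) (j : Nat) :
    PySem.Chars.rfind.go s sub (j + 1)
      = if sub.isPrefixOf (s.drop (j + 1)) then ((j : Int) + 1) else PySem.Chars.rfind.go s sub j := rfl

theorem rfind_go_spec (s sub : List Char) (n : Nat) :
    (PySem.Chars.rfind.go s sub n = -1 ∧ ∀ j, j ≤ n → ¬ sub <+: s.drop j) ∨
    (∃ m : Nat, PySem.Chars.rfind.go s sub n = (m : Int) ∧ m ≤ n ∧ sub <+: s.drop m ∧
      ∀ j, m < j → j ≤ n → ¬ sub <+: s.drop j) := by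
  induction n with
  | zero =>
    rw [rfind_go_zero]
    by_cases h : sub.isPrefixOf s
    · right
      exact ⟨0, by simp [h], le_refl _, by simpa [List.isPrefixOf_iff_prefix] using h, by omega⟩
    · left
      refine ⟨by simp [h], ?_⟩
      intro j hj
      interval_cases j
      simpa [List.isPrefixOf_iff_prefix] using h
  | succ n ih =>
    rw [rfind_go_succ]
    by_cases h : sub.isPrefixOf (s.drop (n + 1))
    · right
      refine ⟨n + 1, by simp [h], le_refl _, by simpa [List.isPrefixOf_iff_prefix] using h, ?_⟩
      intro j h1 h2; omega
    · have hno : ¬ sub <+: s.drop (n + 1) := by simpa [List.isPrefixOf_iff_prefix] using h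
      rw [if_neg (by simpa using h)]
      rcases ih with ⟨he, hall⟩ | ⟨m, he, hm, hp, hmax⟩
      · left
        refine ⟨he, ?_⟩
        intro j hj
        rcases Nat.lt_or_ge j (n + 1) with hlt | hge
        · exact hall j (by omega)
        · have : j = n + 1 := by omega
          subst this; exact hno
      · right
        refine ⟨m, he, by omega, hp, ?_⟩
        intro j h1 h2
        rcases Nat.lt_or_ge j (n + 1) with hlt | hge
        · exact hmax j h1 (by omega)
        · have : j = n + 1 := by omega
          subst this; exact hno

theorem rfind_spec (s sub : List Char) (hsub : sub ≠ []) :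
    (PySem.Chars.rfind s sub = -1 ∧ ∀ j, ¬ sub <+: s.drop j) ∨
    (∃ m : Nat, PySem.Chars.rfind s sub = (m : Int) ∧ sub <+: s.drop m ∧
      ∀ j, m < j → ¬ sub <+: s.drop j) := by
  have key : ∀ j, s.length < j → ¬ sub <+: s.drop j := by
    intro j hj hpre
    rw [List.drop_eq_nil_of_le (by omega)] at hpre
    exact hsub (List.prefix_nil.mp hpre)
  rcases rfind_go_spec s sub s.length with ⟨he, hall⟩ | ⟨m, he, hm, hp, hmax⟩
  · left
    refine ⟨he, ?_⟩
    intro j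
    rcases Nat.lt_or_ge s.length j with h | h
    · exact key j h
    · exact hall j h
  · right
    refine ⟨m, he, hp, ?_⟩
    intro j h1
    rcases Nat.lt_or_ge s.length j with h | h
    · exact key j h
    · exact hmax j h1 h

theorem rfind_eq_of_max (s sub : List Char) (hsub : sub ≠ []) (m : Nat)
    (h1 : sub <+: s.drop m) (h2 : ∀ j, m < j → ¬ sub <+: s.drop j) :
    PySem.Chars.rfind s sub = (m : Int) := by
  rcases rfind_spec s sub hsub with ⟨_, hall⟩ | ⟨m', he, hp, hmax⟩
  · exact absurd h1 (hall m)
  · have : m' = m := by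
      rcases Nat.lt_trichotomy m' m with h | h | h
      · exact absurd h1 (hmax m h)
      · exact h
      · exact absurd hp (h2 m' h)
    rwa [this] at he

theorem rfind_eq_neg_one (s sub : List Char) (hsub : sub ≠ [])
    (h : ∀ j, ¬ sub <+: s.drop j) : PySem.Chars.rfind s sub = -1 := by
  rcases rfind_spec s sub hsub with ⟨he, _⟩ | ⟨m, _, hp, _⟩
  · exact he
  · exact absurd hp (h m)

-- occurrences of ".org/" in a ++ '/' :: b
theorem occ_cons (x b : List Char) (hx : '/' ∉ x) (j : Nat) :
    orgSlashC <+: (x ++ '/' :: b).drop j ↔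
      (x.length + 1 ≤ j ∧ orgSlashC <+: b.drop (j - (x.length + 1))) ∨
      (j + 4 = x.length ∧ orgC <:+ x) := by
  rcases Nat.lt_or_ge x.length j with hj | hj
  · have hj1 : x.length + 1 ≤ j := hj
    have hdrop : (x ++ '/' :: b).drop j = b.drop (j - (x.length + 1)) := by
      rw [List.drop_append]
      rw [List.drop_eq_nil_of_le (by omega)]
      rw [show j - x.length = (j - (x.length + 1)) + 1 by omega]
      simp
    rw [hdrop]
    constructor
    · intro h; exact Or.inl ⟨hj1, h⟩
    · rintro (⟨_, h⟩ | ⟨h4, _⟩)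
      · exact h
      · omega
  · have hdrop : (x ++ '/' :: b).drop j = x.drop j ++ '/' :: b :=
      List.drop_append_of_le_length hj
    rw [hdrop]
    have hlen : (x.drop j).length = x.length - j := List.length_drop ..
    rcases Nat.lt_trichotomy (j + 4) x.length with hc | hc | hc
    · constructor
      · intro h
        exfalso
        have h5 : orgSlashC = (x.drop j ++ '/' :: b).take orgSlashC.length :=
          List.prefix_iff_eq_take.mp h
        rw [List.take_append_of_le_length (by simp [orgSlashC]; omega)] at h5
        have hm : ('/' : Char) ∈ (x.drop j).take orgSlashC.length := by
          rw [← h5]; decide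
        exact hx (List.drop_subset _ _ (List.take_subset _ _ hm))
      · rintro (⟨h1, _⟩ | ⟨h4, _⟩) <;> omega
    · have hkey : orgSlashC <+: x.drop j ++ '/' :: b ↔ orgC <:+ x := by
        rw [List.prefix_iff_eq_take]
        rw [show orgSlashC.length = (x.drop j).length + 1 by simp [orgSlashC]; omega,
            List.take_length_add_append 1]
        rw [List.suffix_iff_eq_drop]
        rw [show x.length - orgC.length = j by simp [orgC]; omega]
        constructor
        · intro h
          rw [show orgSlashC = orgC ++ ['/'] from rfl] at h
          rw [show List.take 1 ('/' :: b) = ['/'] from rfl] at h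
          exact List.append_cancel_right h
        · intro h
          rw [show orgSlashC = orgC ++ ['/'] from rfl, ← h]
          rfl
      rw [hkey]
      constructor
      · intro h; exact Or.inr ⟨hc, h⟩
      · rintro (⟨h1, _⟩ | ⟨_, h⟩)
        · omega
        · exact h
    · constructor
      · intro h
        exfalso
        have hlen2 : 5 ≤ (x.drop j ++ '/' :: b).length := by
          have := h.length_le; simpa [orgSlashC] using this
        have hoff : (x.drop j).length < 4 := by omega
        have hget : (x.drop j ++ '/' :: b)[(x.drop j).length]'(by simp) = '/' := by simp
        have hgp : orgSlashC[(x.drop j).length]'(by simp [orgSlashC]; omega) = '/' :=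
          (List.IsPrefix.getElem h _).trans hget
        have hq : orgSlashC[(x.drop j).length]? = some '/' := by
          rw [List.getElem?_eq_getElem (by simp [orgSlashC]; omega)]
          exact congrArg some hgp
        have hforall : ∀ k : Fin 4, orgSlashC[(k : Nat)]? ≠ some '/' := by decide
        exact hforall ⟨_, hoff⟩ hq
      · rintro (⟨h1, _⟩ | ⟨h4, h⟩)
        · omega
        · exfalso
          have := h.length_le
          simp [orgC] at this
          omega

-- no occurrence of ".org/" in a '/'-free string
theorem occ_free (x : List Char) (hx : '/' ∉ x) (j : Nat) : ¬ orgSlashC <+: x.drop j := by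
  intro h
  have hm : ('/' : Char) ∈ orgSlashC := by decide
  exact hx (List.drop_subset _ _ (h.subset hm))

-- lastOrgIndex on char segments (mirror of B's helper, proof-side only)
def lastOrgC : List (List Char) → Option Nat
  | [] => none
  | x :: t =>
    match lastOrgC t with
    | some i => some (i + 1)
    | none => if PySem.Chars.endswith x orgC then some 0 else none

theorem lastOrgIndex_map (L : List (List Char)) :
    lastOrgIndex (L.map String.ofList) = lastOrgC L := by
  induction L with
  | nil => rfl
  | cons x t ih =>
    simp only [List.map_cons, lastOrgIndex, lastOrgC, ih]
    cases lastOrgC t with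
    | some i => rfl
    | none =>
      have : PySem.Str.endswith (String.ofList x) ".org" = PySem.Chars.endswith x orgC := by
        rw [PySem.Str.endswith_eq, String.toList_ofList]
        rfl
      rw [this]

theorem lastOrgC_eq_none (L : List (List Char)) (h : ∀ y ∈ L, ¬ orgC <:+ y) :
    lastOrgC L = none := by
  induction L with
  | nil => rfl
  | cons x t ih =>
    simp only [lastOrgC, ih (fun y hy => h y (List.mem_cons_of_mem _ hy))]
    rw [if_neg (by simpa [PySem.Chars.endswith, List.isSuffixOf_iff_suffix] using h x List.mem_cons_self)]

theorem lastOrgC_eq_some (L : List (List Char)) (i : Nat) (hi : i < L.length)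
    (h1 : orgC <:+ L[i]) (h2 : ∀ i', i < i' → (hi' : i' < L.length) → ¬ orgC <:+ L[i']) :
    lastOrgC L = some i := by
  induction L generalizing i with
  | nil => simp at hi
  | cons x t ih =>
    cases i with
    | zero =>
      have hnone : lastOrgC t = none := by
        apply lastOrgC_eq_none
        intro y hy
        obtain ⟨k, hk, rfl⟩ := List.mem_iff_getElem.mp hy
        exact h2 (k + 1) (by omega) (by simpa using hk)
      simp only [lastOrgC, hnone]
      rw [if_pos]
      simpa [PySem.Chars.endswith, List.isSuffixOf_iff_suffix] using h1
    | succ i' =>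
      have ht : lastOrgC t = some i' := by
        apply ih i' (by simpa using hi) (by simpa using h1)
        intro k hk hklt
        exact h2 (k + 1) (by omega) (by simpa using hklt)
      simp [lastOrgC, ht]

-- joining a non-empty tail puts the separator back
theorem join_cons_ne (x : List Char) (M : List (List Char)) (hM : M ≠ []) :
    PySem.Chars.join ['/'] (x :: M) = x ++ '/' :: PySem.Chars.join ['/'] M := by
  cases M with
  | nil => exact absurd rfl hM
  | cons y t => rw [PySem.Chars.join_cons_cons]; simp

theorem rfind_eq_neg_one_iff (s sub : List Char) (hsub : sub ≠ []) :
    PySem.Chars.rfind s sub = -1 ↔ ∀ j, ¬ sub <+: s.drop j := by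
  rcases rfind_spec s sub hsub with ⟨he, hall⟩ | ⟨m, he, hp, _⟩
  · exact iff_of_true he hall
  · refine iff_of_false ?_ ?_
    · rw [he]; omega
    · intro h; exact h m hp

-- no occurrence of ".org/" anywhere in x ++ '/' :: b, split along occ_cons
theorem no_occ_cons (x b : List Char) (hx : '/' ∉ x) :
    (∀ j, ¬ orgSlashC <+: (x ++ '/' :: b).drop j) ↔
      (∀ j, ¬ orgSlashC <+: b.drop j) ∧ ¬ orgC <:+ x := by
  constructor
  · intro h
    constructor
    · intro j hocc
      exact h (x.length + 1 + j) ((occ_cons x b hx _).mpr (Or.inl ⟨by omega, by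
        rw [show x.length + 1 + j - (x.length + 1) = j by omega]; exact hocc⟩))
    · intro hsuf
      have h4 : 4 ≤ x.length := by
        have := hsuf.length_le; simpa [orgC] using this
      exact h (x.length - 4) ((occ_cons x b hx _).mpr (Or.inr ⟨by omega, hsuf⟩))
  · rintro ⟨hb, hxs⟩ j hocc
    rcases (occ_cons x b hx j).mp hocc with ⟨_, h⟩ | ⟨_, h⟩
    · exact hb _ h
    · exact hxs h

-- the final segment carries the ".org" suffix of the whole string
theorem inv_last (M : List (List Char)) (hM : M ≠ []) (hfree : ∀ l ∈ M, '/' ∉ l) :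
    (orgC <:+ PySem.Chars.join ['/'] M ↔ orgC <:+ M.getLast hM) := by
  induction M with
  | nil => exact absurd rfl hM
  | cons x M' ih =>
    cases M' with
    | nil => simp [PySem.Chars.join_singleton]
    | cons y t =>
      rw [join_cons_ne x (y :: t) (by simp)]
      rw [suffix_through_slash _ _ _ (by decide)]
      rw [List.getLast_cons (by simp)]
      exact ih (by simp) (fun l hl => hfree l (List.mem_cons_of_mem _ hl))

-- rfind misses ".org/" exactly when no non-final segment ends with ".org"
theorem inv_none (M : List (List Char)) (hM : M ≠ []) (hfree : ∀ l ∈ M, '/' ∉ l) :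
    (PySem.Chars.rfind (PySem.Chars.join ['/'] M) orgSlashC = -1 ↔
      ∀ i, (hi : i + 1 < M.length) → ¬ orgC <:+ M[i]) := by
  induction M with
  | nil => exact absurd rfl hM
  | cons x M' ih =>
    cases M' with
    | nil =>
      rw [PySem.Chars.join_singleton]
      refine iff_of_true (rfind_eq_neg_one _ _ (by decide)
        (occ_free x (hfree x List.mem_cons_self))) ?_
      intro i hi
      simp at hi
    | cons y t =>
      rw [join_cons_ne x (y :: t) (by simp)]
      rw [rfind_eq_neg_one_iff _ _ (by decide)]
      rw [no_occ_cons _ _ (hfree x List.mem_cons_self)]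
      rw [← rfind_eq_neg_one_iff _ _ (by decide)]
      rw [ih (by simp) (fun l hl => hfree l (List.mem_cons_of_mem _ hl))]
      constructor
      · rintro ⟨hM', hx⟩ i hi
        cases i with
        | zero => simpa using hx
        | succ i' => simpa using hM' i' (by simpa using hi)
      · intro h
        refine ⟨?_, ?_⟩
        · intro i' hi'
          simpa using h (i' + 1) (by simpa using hi')
        · simpa using h 0 (by simp)

-- a found ".org/" names the last segment ending with ".org", and the cut points
theorem inv_found (M : List (List Char)) (hM : M ≠ []) (hfree : ∀ l ∈ M, '/' ∉ l) :
    ∀ m : Nat, PySem.Chars.rfind (PySem.Chars.join ['/'] M) orgSlashC = (m : Int) →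
      ∃ i, ∃ (hi : i + 1 < M.length), orgC <:+ M[i] ∧
        (∀ i', i < i' → (hi' : i' + 1 < M.length) → ¬ orgC <:+ M[i']) ∧
        (PySem.Chars.join ['/'] M).take (m + 4) = PySem.Chars.join ['/'] (M.take (i + 1)) ∧
        (PySem.Chars.join ['/'] M).drop (m + 5) = PySem.Chars.join ['/'] (M.drop (i + 1)) := by
  induction M with
  | nil => exact absurd rfl hM
  | cons x M' ih =>
    intro m hm
    cases M' with
    | nil =>
      exfalso
      rw [PySem.Chars.join_singleton] at hm
      rw [rfind_eq_neg_one _ _ (by decide) (occ_free x (hfree x List.mem_cons_self))] at hm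
      omega
    | cons y t =>
      have hfx : '/' ∉ x := hfree x List.mem_cons_self
      have hfree' : ∀ l ∈ y :: t, '/' ∉ l := fun l hl => hfree l (List.mem_cons_of_mem _ hl)
      set b := PySem.Chars.join ['/'] (y :: t) with hb
      have hs : PySem.Chars.join ['/'] (x :: y :: t) = x ++ '/' :: b :=
        join_cons_ne x (y :: t) (by simp)
      rw [hs] at hm
      rcases rfind_spec (x ++ '/' :: b) orgSlashC (by decide) with ⟨he, _⟩ | ⟨m0, he, hocc, hmax⟩
      · rw [he] at hm; omega
      · have hEq : m0 = m := by rw [he] at hm; omega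
        rw [hEq] at hocc hmax
        rcases (occ_cons x b hfx m).mp hocc with ⟨hle, hocc'⟩ | ⟨h4, hsuf⟩
        · -- occurrence inside the tail b
          set k := m - (x.length + 1) with hk
          have hmk : m = x.length + 1 + k := by omega
          have hmaxb : ∀ j, k < j → ¬ orgSlashC <+: b.drop j := by
            intro j hj hocc2
            exact hmax (x.length + 1 + j) (by omega)
              ((occ_cons x b hfx _).mpr (Or.inl ⟨by omega, by
                rw [show x.length + 1 + j - (x.length + 1) = j by omega]; exact hocc2⟩))
          have hrb : PySem.Chars.rfind b orgSlashC = (k : Int) :=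
            rfind_eq_of_max b orgSlashC (by decide) k hocc' hmaxb
          obtain ⟨i', hi', hsuf', hmax', htake', hdrop'⟩ := ih (by simp) hfree' k hrb
          refine ⟨i' + 1, by simpa using hi', by simpa using hsuf', ?_, ?_, ?_⟩
          · intro i'' hgt hi''
            cases i'' with
            | zero => omega
            | succ j => simpa using hmax' j (by omega) (by simpa using hi'')
          · rw [hs, hmk]
            have : x ++ '/' :: b = (x ++ ['/']) ++ b := by simp
            rw [this, show x.length + 1 + k + 4 = (x ++ ['/']).length + (k + 4) by simp; omega,
              List.take_length_add_append, htake']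
            have htk : (y :: t).take (i' + 1) = y :: t.take i' := by simp
            rw [show (x :: y :: t).take (i' + 1 + 1) = x :: (y :: t).take (i' + 1) by simp]
            rw [join_cons_ne x _ (by simp [htk])]
            simp
          · rw [hs, hmk]
            have : x ++ '/' :: b = (x ++ ['/']) ++ b := by simp
            rw [this, show x.length + 1 + k + 5 = (x ++ ['/']).length + (k + 5) by simp; omega,
              List.drop_length_add_append, hdrop']
            rfl
        · -- the occurrence sits at the end of x itself
          have hnob : ∀ j, ¬ orgSlashC <+: b.drop j := by
            intro j hocc2
            exact hmax (x.length + 1 + j) (by omega)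
              ((occ_cons x b hfx _).mpr (Or.inl ⟨by omega, by
                rw [show x.length + 1 + j - (x.length + 1) = j by omega]; exact hocc2⟩))
          have hrb : PySem.Chars.rfind b orgSlashC = -1 :=
            (rfind_eq_neg_one_iff _ _ (by decide)).mpr hnob
          have hnone := (inv_none (y :: t) (by simp) hfree').mp hrb
          refine ⟨0, by simp, by simpa using hsuf, ?_, ?_, ?_⟩
          · intro i'' hgt hi''
            cases i'' with
            | zero => omega
            | succ j => simpa using hnone j (by simpa using hi'')
          · rw [hs, show m + 4 = x.length by omega]
            rw [List.take_append_of_le_length (le_refl _), List.take_length]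
            simp [PySem.Chars.join_singleton]
          · rw [hs, show m + 5 = x.length + 1 by omega]
            have : x ++ '/' :: b = (x ++ ['/']) ++ b := by simp
            rw [this, show x.length + 1 = (x ++ ['/']).length + 0 by simp, List.drop_length_add_append]
            rfl

-- bridging the two ports to the char level
theorem segs_eq (p : String) :
    (PySem.Str.split? p "/").getD [] = (p.toList.splitOn '/').map String.ofList := by
  simp only [PySem.Str.split?, PySem.Chars.split?]
  rw [show ("/" : String).toList = ['/'] from rfl]
  simp [pysplitOn_single]

theorem strJoin_eq (sep : String) (parts : List String) :
    PySem.Str.join sep parts = String.ofList (PySem.Chars.join sep.toList (parts.map String.toList)) := rfl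

theorem map_toList_take (L : List (List Char)) (n : Nat) :
    ((L.map String.ofList).take n).map String.toList = L.take n := by
  rw [← List.map_take, List.map_map]
  simp [Function.comp_def, String.toList_ofList]

-- ===== VERDICT (by name: the statement is the Claim_ definition above) =====
set_option maxHeartbeats 2000000 in
theorem partition_headline_path_spec : Claim_equal_partition_headline_path := by
  unfold Claim_equal_partition_headline_path
  intro path _
  unfold Spec_partition_headline_path partition_headline_path partition_headline_path_alt
  simp only []
  set p := PySem.Str.strip path with hp
  set s := p.toList with hs
  set L := s.splitOn '/' with hL
  have hLne : L ≠ [] := by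
    rw [hL, List.splitOn]; exact List.splitOnP_ne_nil _ _
  have hfree : ∀ l ∈ L, '/' ∉ l := splitOn_slash_free s
  have hjoin : PySem.Chars.join ['/'] L = s := by
    show ['/'].intercalate L = s
    exact List.intercalate_splitOn s '/'
  have hsegs : (PySem.Str.split? p "/").getD [] = L.map String.ofList := segs_eq p
  have hlast : lastOrgIndex (L.map String.ofList) = lastOrgC L := lastOrgIndex_map L
  have hend : PySem.Str.endswith p ".org" = PySem.Chars.endswith s orgC := by
    rw [PySem.Str.endswith_eq]; rfl
  have hendiff : PySem.Chars.endswith s orgC = true ↔ orgC <:+ s :=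
    List.isSuffixOf_iff_suffix
  have hrf : PySem.Str.rfind p ".org/" = PySem.Chars.rfind s orgSlashC := by
    rw [PySem.Str.rfind_eq]; rfl
  by_cases hE : PySem.Str.endswith p ".org" = true
  · -- A's first branch: the whole path ends with ".org"
    rw [if_pos hE]
    have hsuf : orgC <:+ L.getLast hLne := by
      rw [← (inv_last L hLne hfree), hjoin]
      exact hendiff.mp (hend ▸ hE)
    have hLpos : 0 < L.length := List.length_pos_iff.mpr hLne
    have hsome : lastOrgC L = some (L.length - 1) := by
      apply lastOrgC_eq_some L (L.length - 1) (by omega)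
      · rw [← List.getLast_eq_getElem hLne]; exact hsuf
      · intro i' h1 h2; omega
    rw [hsegs, hlast, hsome]
    refine Prod.ext ?_ ?_
    · show p = PySem.Str.join "/" ((L.map String.ofList).take (L.length - 1 + 1))
      rw [show L.length - 1 + 1 = L.length by omega]
      rw [List.take_of_length_le (by simp)]
      symm
      show String.ofList (PySem.Chars.join ['/'] ((L.map String.ofList).map String.toList)) = p
      have : (L.map String.ofList).map String.toList = L := by
        simp [List.map_map, Function.comp_def, String.toList_ofList]
      rw [this, hjoin, hs, String.ofList_toList]
    · show ([] : List String) = ((L.map String.ofList).drop (L.length - 1 + 1)).filter (fun t => t != "")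
      rw [show L.length - 1 + 1 = L.length by omega]
      rw [List.drop_of_length_le (by simp)]
      rfl
  · rw [if_neg hE]
    have hnotsuf : ¬ orgC <:+ L.getLast hLne := by
      rw [← (inv_last L hLne hfree), hjoin]
      intro h
      exact hE (hend ▸ hendiff.mpr h)
    rcases rfind_spec s orgSlashC (by decide) with ⟨he, _⟩ | ⟨m, he, _, _⟩
    · -- A's second branch: no ".org/" anywhere
      rw [hrf, if_pos he]
      have hnone : lastOrgC L = none := by
        apply lastOrgC_eq_none
        intro y hy
        obtain ⟨i, hi, rfl⟩ := List.mem_iff_getElem.mp hy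
        rcases Nat.lt_or_ge (i + 1) L.length with hlt | hge
        · exact (inv_none L hLne hfree).mp (by rwa [hjoin]) i hlt
        · have : i = L.length - 1 := by omega
          subst this
          rwa [← List.getLast_eq_getElem hLne]
      rw [hsegs, hlast, hnone]
    · -- A's third branch: cut at the last ".org/"
      rw [hrf, if_neg (by rw [he]; omega)]
      obtain ⟨i, hi, hsuf, hmax, htake, hdrop⟩ :=
        inv_found L hLne hfree m (by rwa [hjoin])
      rw [hjoin] at htake hdrop
      have hsome : lastOrgC L = some i := by
        apply lastOrgC_eq_some L i (by omega) hsuf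
        intro i' h1 h2
        rcases Nat.lt_or_ge (i' + 1) L.length with hlt | hge
        · exact hmax i' h1 hlt
        · have : i' = L.length - 1 := by omega
          subst this
          rwa [← List.getLast_eq_getElem hLne]
      rw [hsegs, hlast, hsome]
      have hslice4 : PySem.Chars.slice s (some 0) (some (PySem.Chars.rfind s orgSlashC + 4))
          = s.take (m + 4) := by
        rw [he, PySem.Chars.slice_eq_listSlice]
        rw [PySem.List.slice_zero_start, PySem.List.slice_to _ (by positivity)]
        congr 1
      have hslice5 : PySem.Chars.slice s (some (PySem.Chars.rfind s orgSlashC + 5)) none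
          = s.drop (m + 5) := by
        rw [he, PySem.Chars.slice_eq_listSlice]
        rw [PySem.List.slice_from _ (by positivity)]
        congr 1
      refine Prod.ext ?_ ?_
      · show String.ofList (PySem.Chars.slice s (some 0) (some (PySem.Chars.rfind s orgSlashC + 4)))
            = PySem.Str.join "/" ((L.map String.ofList).take (i + 1))
        rw [hslice4, htake, strJoin_eq, map_toList_take]
        rw [show ("/" : String).toList = ['/'] from rfl]
      · -- headline lists agree
        have htail : PySem.Str.slice p (some (PySem.Chars.rfind s orgSlashC + 5)) none
            = String.ofList (PySem.Chars.join ['/'] (L.drop (i + 1))) := by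
          show String.ofList (PySem.Chars.slice s _ _) = _
          rw [hslice5, hdrop]
        rw [htail, segs_eq]
        rw [String.toList_ofList]
        have hdropped : (PySem.Chars.join ['/'] (L.drop (i + 1))).splitOn '/' = L.drop (i + 1) := by
          show (['/'].intercalate (L.drop (i + 1))).splitOn '/' = L.drop (i + 1)
          apply List.splitOn_intercalate
          · intro l hl; exact hfree l (List.mem_of_mem_drop hl)
          · intro hnil
            have := congrArg List.length hnil
            simp at this
            omega
        rw [hdropped, List.map_drop]
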